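-- pv_equiv track=rewrite | github.com/michaelzhan1/advent2024 | day10.py | get_trailhead_score
-- ===== SOURCE A (Python) =====
-- from collections import deque
--
-- def get_trailhead_score(grid, i, j):
--     n = len(grid)
--     m = len(grid[0])
--     count = 0
--     queue = deque([(i, j)])
--     seen = {(i, j)}
--
--     while queue:
--         i, j = queue.popleft()
--         if grid[i][j] == 9:
--             count += 1
--             continue
--
--         for di, dj in [(0, 1), (0, -1), (1, 0), (-1, 0)]:
--             ni, nj = i + di, j + dj
--             if 0 <= ni < n and 0 <= nj < m and grid[ni][nj] == grid[i][j] + 1 and (ni, nj) not in seen: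
--                 queue.append((ni, nj))
--                 seen.add((ni, nj))
--     return count
-- ===== SOURCE B (Python) =====
-- def get_trailhead_score(grid, i, j):
--     # Layered pull-DP: along any trail the height rises by exactly 1, so the
--     # cells reachable in k steps are exactly the reachable cells of height
--     # v0+k.  Compute each height layer by scanning the whole grid and pulling
--     # from the previous layer; no queue and no visited set are needed.
--     n, m = len(grid), len(grid[0])
--     layer = [(i, j)]
--     v = grid[i][j]
--     while v != 9 and layer:
--         v += 1
--         layer = [(a, b) for a in range(n) for b in range(m)
--                  if grid[a][b] == v
--                  and ((a, b + 1) in layer or (a, b - 1) in layer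
--                       or (a + 1, b) in layer or (a - 1, b) in layer)]
--     return len(layer)
-- ===== Notes on version B (the rewrite author's own statement) =====
-- stated objective: alternative
-- what changed: Replaced the queue-plus-visited-set BFS by a layered pull-DP with no queue and no visited set: heights along a trail rise by exactly 1, so B recomputes each height layer by scanning the whole grid and keeping the cells of the next height adjacent to the previous layer, returning the size of the layer when the height counter reaches 9.
-- outside the precondition, e.g. on get_trailhead_score([[5, 9], [0]], 0, 0): A returns 0, B raises IndexError; on get_trailhead_score([[1], [2, 9]], 1, 1): A returns 1, B returns 1
import Mathlib
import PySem

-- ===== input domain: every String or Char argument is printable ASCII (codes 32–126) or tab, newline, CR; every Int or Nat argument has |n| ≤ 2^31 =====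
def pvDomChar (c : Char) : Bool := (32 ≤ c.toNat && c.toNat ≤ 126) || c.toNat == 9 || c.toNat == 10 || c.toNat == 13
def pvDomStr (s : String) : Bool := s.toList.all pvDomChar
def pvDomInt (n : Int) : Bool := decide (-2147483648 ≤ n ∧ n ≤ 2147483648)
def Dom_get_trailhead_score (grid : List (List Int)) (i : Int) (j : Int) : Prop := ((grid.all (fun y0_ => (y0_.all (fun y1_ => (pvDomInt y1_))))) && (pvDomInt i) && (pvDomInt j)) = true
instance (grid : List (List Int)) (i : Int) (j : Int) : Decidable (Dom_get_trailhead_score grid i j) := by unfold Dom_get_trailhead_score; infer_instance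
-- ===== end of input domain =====

-- B replaces A's queue-plus-visited-set BFS by a layered pull-DP: each height layer is
-- recomputed by scanning the whole grid, with no queue and no visited set (objective:
-- alternative); the return values are proved equal on Pre_.

-- ===== PORT A =====
-- grid[p][q] for Int indices (Python negative-index semantics; none = IndexError, excluded by Pre_)
def pvCell? (grid : List (List Int)) (p : Int × Int) : Option Int :=
  (PySem.List.pyGet? grid p.1).bind fun row => PySem.List.pyGet? row p.2

-- one direction (di, dj) of A's inner `for di, dj in [...]` loop body
def pvStepA (grid : List (List Int)) (n m v i j : Int)
    (acc : List (Int × Int) × PySem.Set (Int × Int)) (d : Int × Int) :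
    List (Int × Int) × PySem.Set (Int × Int) :=
  if 0 ≤ i + d.1 && i + d.1 < n && 0 ≤ j + d.2 && j + d.2 < m
      && (pvCell? grid (i + d.1, j + d.2) == some (v + 1))
      && !(PySem.Set.contains acc.2 (i + d.1, j + d.2))
  then (acc.1 ++ [(i + d.1, j + d.2)], PySem.Set.add acc.2 (i + d.1, j + d.2))
  else acc

-- A's `while queue` loop; fuel only bounds the number of pops (Python terminates because
-- `seen` never shrinks; the fuel chosen below is proved sufficient by the equivalence lemmas)
def pvLoopA (grid : List (List Int)) (n m : Int) :
    Nat → List (Int × Int) → PySem.Set (Int × Int) → Int → Int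
  | 0, _, _, count => count
  | _ + 1, [], _, count => count
  | fuel + 1, (i, j) :: queue, seen, count =>
    let v := (pvCell? grid (i, j)).getD 0
    if v == 9 then
      pvLoopA grid n m fuel queue seen (count + 1)
    else
      let qs := [((0 : Int), (1 : Int)), (0, -1), (1, 0), (-1, 0)].foldl
        (pvStepA grid n m v i j) (queue, seen)
      pvLoopA grid n m fuel qs.1 qs.2 count

def get_trailhead_score (grid : List (List Int)) (i : Int) (j : Int) : Int :=
  pvLoopA grid grid.length (grid.headD []).length
    (grid.length * (grid.headD []).length + 2)
    [(i, j)] (PySem.Set.ofList [(i, j)]) 0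

-- ===== PORT B =====
-- B's `(a, b+1) in layer or … or (a-1, b) in layer` test
def pvNbrIn (layer : List (Int × Int)) (a b : Int) : Bool :=
  layer.contains (a, b + 1) || layer.contains (a, b - 1)
    || layer.contains (a + 1, b) || layer.contains (a - 1, b)

-- B's comprehension: scan the whole n × m grid and keep the cells of value v
-- that have a neighbour in the previous layer
def pvPull (grid : List (List Int)) (n m v : Int) (layer : List (Int × Int)) :
    List (Int × Int) :=
  ((PySem.List.pyRange 0 n 1).flatMap fun a =>
      (PySem.List.pyRange 0 m 1).map fun b => (a, b)).filter
    fun p => (pvCell? grid p == some v) && pvNbrIn layer p.1 p.2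

-- B's `while v != 9 and layer` loop (the fuel is proved sufficient below)
def pvLoopPull (grid : List (List Int)) (n m : Int) :
    Nat → List (Int × Int) → Int → Int
  | 0, layer, _ => (layer.length : Int)
  | fuel + 1, layer, v =>
    if !(v == 9) && !layer.isEmpty then
      pvLoopPull grid n m fuel (pvPull grid n m (v + 1) layer) (v + 1)
    else (layer.length : Int)

def get_trailhead_score_alt (grid : List (List Int)) (i : Int) (j : Int) : Int :=
  pvLoopPull grid grid.length (grid.headD []).length
    (grid.length * (grid.headD []).length + 2)
    [(i, j)] ((pvCell? grid (i, j)).getD 0)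

-- ===== PRECONDITION & SPEC =====
-- Pre_ excludes inputs where Python A can raise IndexError: the empty grid, grids with a row
-- shorter than row 0 (a neighbour read may run past such a row), and start coordinates outside
-- Python's index range for grid resp. row 0.  This is slightly narrower than where A returns:
-- on some such ragged grids, or with j beyond row 0's length inside row i, A happens not to
-- reach a bad read and returns (B raises there, or returns the same value).
def Pre_get_trailhead_score (grid : List (List Int)) (i : Int) (j : Int) : Prop :=
  0 < grid.length ∧ (∀ row ∈ grid, (grid.headD []).length ≤ row.length) ∧
  -(grid.length : Int) ≤ i ∧ i < grid.length ∧
  -((grid.headD []).length : Int) ≤ j ∧ j < (grid.headD []).length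
instance (grid : List (List Int)) (i : Int) (j : Int) : Decidable (Pre_get_trailhead_score grid i j) := by
  unfold Pre_get_trailhead_score; infer_instance

def pvWitness_get_trailhead_score : List (List Int) × Int × Int := ([[0, 1], [1, 2]], 0, 0)

def Spec_get_trailhead_score (grid : List (List Int)) (i : Int) (j : Int) (out : Int) : Prop := out = get_trailhead_score_alt grid i j
instance (grid : List (List Int)) (i : Int) (j : Int) (out : Int) : Decidable (Spec_get_trailhead_score grid i j out) := by unfold Spec_get_trailhead_score; infer_instance

-- ===== CLAIM (what is proved, stated in full; the proofs are below) =====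
def Claim_equal_get_trailhead_score : Prop := ∀ (grid : List (List Int)) (i : Int) (j : Int), Dom_get_trailhead_score grid i j → Pre_get_trailhead_score grid i j → Spec_get_trailhead_score grid i j (get_trailhead_score grid i j)

-- ===== LEMMAS AND PROOFS =====

-- ghost BFS-by-levels loop: the proof bridge between A's queue and B's layers
-- one candidate neighbour: keep q if it is in range, has height w and is unseen
def pvStepB (grid : List (List Int)) (n m w : Int)
    (acc : List (Int × Int) × PySem.Set (Int × Int)) (q : Int × Int) :
    List (Int × Int) × PySem.Set (Int × Int) :=
  if 0 ≤ q.1 && q.1 < n && 0 ≤ q.2 && q.2 < m && (pvCell? grid q == some w)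
      && !(PySem.Set.contains acc.2 q)
  then (acc.1 ++ [q], PySem.Set.add acc.2 q)
  else acc

-- the four neighbours of a cell
def pvNbrs (p : Int × Int) : List (Int × Int) :=
  [(p.1, p.2 + 1), (p.1, p.2 - 1), (p.1 + 1, p.2), (p.1 - 1, p.2)]

-- scan the four neighbours of one cell
def pvExpand (grid : List (List Int)) (n m w : Int)
    (acc : List (Int × Int) × PySem.Set (Int × Int)) (p : Int × Int) :
    List (Int × Int) × PySem.Set (Int × Int) :=
  (pvNbrs p).foldl (pvStepB grid n m w) acc

-- the ghost loop: expand a whole level at a time, keeping A's seen set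
def pvLoopPush (grid : List (List Int)) (n m : Int) :
    Nat → List (Int × Int) → PySem.Set (Int × Int) → Int → Int
  | 0, frontier, _, _ => (frontier.length : Int)
  | fuel + 1, frontier, seen, v =>
    if frontier.isEmpty || v == 9 then (frontier.length : Int)
    else
      let ns := frontier.foldl (pvExpand grid n m (v + 1)) ([], seen)
      pvLoopPush grid n m fuel ns.1 ns.2 (v + 1)

-- a cell inside the n × m board
def pvInRange (n m : Int) (p : Int × Int) : Prop := 0 ≤ p.1 ∧ p.1 < n ∧ 0 ≤ p.2 ∧ p.2 < m

-- number of in-range cells not yet in the seen list (indexed by Nat coordinates)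
def pvUnseen (n m : Int) (S : List (Int × Int)) : Nat :=
  ((Finset.range n.toNat ×ˢ Finset.range m.toNat).filter
    (fun p => ((p.1 : Int), (p.2 : Int)) ∉ S)).card

-- A's direction step is the ghost's neighbour step at the translated cell
lemma pvStepA_eq (grid : List (List Int)) (n m v i j : Int)
    (acc : List (Int × Int) × PySem.Set (Int × Int)) (d : Int × Int) :
    pvStepA grid n m v i j acc d = pvStepB grid n m (v + 1) acc (i + d.1, j + d.2) := rfl

-- A's four-direction fold on a popped cell equals the ghost's neighbour scan of that cell
lemma pvFoldDirs (grid : List (List Int)) (n m v i j : Int)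
    (acc : List (Int × Int) × PySem.Set (Int × Int)) :
    [((0 : Int), (1 : Int)), (0, -1), (1, 0), (-1, 0)].foldl (pvStepA grid n m v i j) acc
      = pvExpand grid n m (v + 1) acc (i, j) := by
  simp only [pvExpand, pvNbrs, List.foldl_cons, List.foldl_nil, pvStepA_eq, add_zero,
    ← sub_eq_add_neg]

-- the step only appends: the queue accumulator factors out
lemma pvStepB_fst (grid : List (List Int)) (n m w : Int)
    (q : List (Int × Int)) (S : PySem.Set (Int × Int)) (a : Int × Int) :
    pvStepB grid n m w (q, S) a
      = (q ++ (pvStepB grid n m w ([], S) a).1, (pvStepB grid n m w ([], S) a).2) := by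
  unfold pvStepB
  dsimp only
  split <;> simp

-- … hence so does the whole neighbour scan
lemma pvFoldStepB_shift (grid : List (List Int)) (n m w : Int) :
    ∀ (L : List (Int × Int)) (q : List (Int × Int)) (S : PySem.Set (Int × Int)),
      L.foldl (pvStepB grid n m w) (q, S)
        = (q ++ (L.foldl (pvStepB grid n m w) ([], S)).1,
           (L.foldl (pvStepB grid n m w) ([], S)).2) := by
  intro L
  induction L with
  | nil => intro q S; simp
  | cons a L ih =>
    intro q S
    simp only [List.foldl_cons]
    rw [pvStepB_fst]
    rcases he : pvStepB grid n m w ([], S) a with ⟨e1, e2⟩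
    rw [ih (q ++ e1) e2, ih e1 e2, List.append_assoc]

lemma pvExpand_shift (grid : List (List Int)) (n m w : Int)
    (q : List (Int × Int)) (S : PySem.Set (Int × Int)) (p : Int × Int) :
    pvExpand grid n m w (q, S) p
      = (q ++ (pvExpand grid n m w ([], S) p).1, (pvExpand grid n m w ([], S) p).2) := by
  unfold pvExpand; exact pvFoldStepB_shift grid n m w _ q S

-- what one neighbour scan produces: fresh, in-range cells of height w, appended to queue and seen
lemma pvFoldStepB_spec (grid : List (List Int)) (n m w : Int) :
    ∀ (L : List (Int × Int)) (q : List (Int × Int)) (S : PySem.Set (Int × Int)),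
      ∃ new, L.foldl (pvStepB grid n m w) (q, S) = (q ++ new, S ++ new) ∧ new.Nodup ∧
        ∀ p ∈ new, p ∉ S ∧ pvCell? grid p = some w ∧ pvInRange n m p := by
  intro L
  induction L with
  | nil => intro q S; exact ⟨[], by simp⟩
  | cons a L ih =>
    intro q S
    simp only [List.foldl_cons]
    by_cases h : (0 ≤ a.1 && a.1 < n && 0 ≤ a.2 && a.2 < m && (pvCell? grid a == some w)
        && !(PySem.Set.contains S a)) = true
    · have hp := h
      simp only [Bool.and_eq_true, Bool.not_eq_true', decide_eq_true_eq, beq_iff_eq] at hp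
      obtain ⟨⟨⟨⟨⟨h1, h2⟩, h3⟩, h4⟩, h5⟩, h6⟩ := hp
      have hna : a ∉ S := by
        intro hmem
        rw [(PySem.Set.contains_iff S a).mpr hmem] at h6
        simp at h6
      have hstep : pvStepB grid n m w (q, S) a = (q ++ [a], S ++ [a]) := by
        unfold pvStepB
        dsimp only
        rw [if_pos h, PySem.Set.add_of_not_mem hna]
      rw [hstep]
      obtain ⟨new, hfold, hnd, hprops⟩ := ih (q ++ [a]) (S ++ [a])
      refine ⟨a :: new, ?_, ?_, ?_⟩
      · rw [hfold]; simp
      · refine List.nodup_cons.mpr ⟨fun hc => ?_, hnd⟩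
        exact ((hprops a hc).1) (by simp)
      · intro p hp
        rcases List.mem_cons.mp hp with rfl | hp'
        · exact ⟨hna, h5, h1, h2, h3, h4⟩
        · obtain ⟨hns, hc, hr⟩ := hprops p hp'
          exact ⟨fun hmem => hns (by simp [hmem]), hc, hr⟩
    · have hstep : pvStepB grid n m w (q, S) a = (q, S) := by
        unfold pvStepB
        dsimp only
        rw [if_neg h]
      rw [hstep]
      exact ih q S

-- the same for a whole frontier sweep
lemma pvFoldExpand_spec (grid : List (List Int)) (n m w : Int) :
    ∀ (F : List (Int × Int)) (q : List (Int × Int)) (S : PySem.Set (Int × Int)),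
      ∃ new, F.foldl (pvExpand grid n m w) (q, S) = (q ++ new, S ++ new) ∧ new.Nodup ∧
        ∀ p ∈ new, p ∉ S ∧ pvCell? grid p = some w ∧ pvInRange n m p := by
  intro F
  induction F with
  | nil => intro q S; exact ⟨[], by simp⟩
  | cons p F ih =>
    intro q S
    simp only [List.foldl_cons]
    obtain ⟨n1, h1, hnd1, hp1⟩ := pvFoldStepB_spec grid n m w (pvNbrs p) q S
    rw [show pvExpand grid n m w (q, S) p = (q ++ n1, S ++ n1) from h1]
    obtain ⟨n2, h2, hnd2, hp2⟩ := ih (q ++ n1) (S ++ n1)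
    refine ⟨n1 ++ n2, by rw [h2]; simp, ?_, ?_⟩
    · refine List.nodup_append.mpr ⟨hnd1, hnd2, ?_⟩
      rintro x hx1 b hb2 rfl
      exact (hp2 x hb2).1 (by simp [hx1])
    · intro x hx
      rcases List.mem_append.mp hx with hx1 | hx2
      · exact hp1 x hx1
      · obtain ⟨hns, hc, hr⟩ := hp2 x hx2
        exact ⟨fun hmem => hns (by simp [hmem]), hc, hr⟩

-- A pops one whole level (all of height v ≠ 9): the queue advances by one frontier sweep
lemma pvLoopA_level (grid : List (List Int)) (n m : Int) (v : Int) (hv : (v == 9) = false) :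
    ∀ (F G : List (Int × Int)) (S : PySem.Set (Int × Int)) (c : Int) (fa : Nat),
      (∀ p ∈ F, pvCell? grid p = some v) →
      pvLoopA grid n m (fa + F.length) (F ++ G) S c
        = pvLoopA grid n m fa (F.foldl (pvExpand grid n m (v + 1)) (G, S)).1
            (F.foldl (pvExpand grid n m (v + 1)) (G, S)).2 c := by
  intro F
  induction F with
  | nil => intro G S c fa _; simp
  | cons p F ih =>
    intro G S c fa HF
    obtain ⟨pi, pj⟩ := p
    have hc : pvCell? grid (pi, pj) = some v := HF _ (by simp)
    have hlen : fa + ((pi, pj) :: F).length = (fa + F.length) + 1 := by simp; omega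
    rw [hlen]
    show pvLoopA grid n m ((fa + F.length) + 1) ((pi, pj) :: (F ++ G)) S c = _
    simp only [pvLoopA, hc, Option.getD_some, hv, Bool.false_eq_true, if_false]
    rw [pvFoldDirs, pvExpand_shift]
    rcases he : pvExpand grid n m (v + 1) ([], S) (pi, pj) with ⟨e1, e2⟩
    dsimp only
    rw [show F ++ G ++ e1 = F ++ (G ++ e1) from List.append_assoc F G e1]
    rw [ih (G ++ e1) e2 c fa (fun x hx => HF x (by simp [hx]))]
    rw [List.foldl_cons, show pvExpand grid n m (v + 1) (G, S) (pi, pj) = (G ++ e1, e2) by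
      rw [pvExpand_shift, he]]

-- A pops a queue consisting only of 9-cells: each adds one to the count
lemma pvLoopA_nines (grid : List (List Int)) (n m : Int) :
    ∀ (F : List (Int × Int)) (S : PySem.Set (Int × Int)) (c : Int) (fa : Nat),
      (∀ p ∈ F, pvCell? grid p = some 9) →
      pvLoopA grid n m (fa + F.length) F S c = c + F.length := by
  intro F
  induction F with
  | nil => intro S c fa _; cases fa <;> simp [pvLoopA]
  | cons p F ih =>
    intro S c fa HF
    obtain ⟨pi, pj⟩ := p
    have hc : pvCell? grid (pi, pj) = some 9 := HF _ (by simp)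
    have hlen : fa + ((pi, pj) :: F).length = (fa + F.length) + 1 := by simp; omega
    rw [hlen]
    show pvLoopA grid n m ((fa + F.length) + 1) ((pi, pj) :: F) S c = _
    simp only [pvLoopA, hc, Option.getD_some, BEq.rfl, if_true]
    rw [ih S (c + 1) fa (fun x hx => HF x (by simp [hx]))]
    simp only [List.length_cons]
    push_cast
    ring

-- appending fresh in-range cells to seen lowers the unseen count by exactly their number
lemma pvUnseen_append (n m : Int) (S new : List (Int × Int)) (hnd : new.Nodup)
    (hprops : ∀ p ∈ new, p ∉ S ∧ pvInRange n m p) :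
    pvUnseen n m (S ++ new) + new.length = pvUnseen n m S := by
  have hinj : ∀ x ∈ new, ∀ y ∈ new,
      (fun p : Int × Int => (p.1.toNat, p.2.toNat)) x
        = (fun p : Int × Int => (p.1.toNat, p.2.toNat)) y → x = y := by
    intro x hx y hy hxy
    obtain ⟨hx1, _, hx2, _⟩ := (hprops x hx).2
    obtain ⟨hy1, _, hy2, _⟩ := (hprops y hy).2
    simp only [Prod.mk.injEq] at hxy
    have := congrArg (fun t : Nat => (t : Int)) hxy.1
    have := congrArg (fun t : Nat => (t : Int)) hxy.2
    simp only [Int.toNat_of_nonneg hx1, Int.toNat_of_nonneg hy1,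
      Int.toNat_of_nonneg hx2, Int.toNat_of_nonneg hy2] at *
    exact Prod.ext (by omega) (by omega)
  have hndN : (new.map (fun p : Int × Int => (p.1.toNat, p.2.toNat))).Nodup :=
    List.Nodup.map_on hinj hnd
  have hmemN : ∀ p : Nat × Nat,
      p ∈ (new.map (fun p : Int × Int => (p.1.toNat, p.2.toNat))).toFinset
        ↔ ((p.1 : Int), (p.2 : Int)) ∈ new := by
    intro p
    simp only [List.mem_toFinset, List.mem_map]
    constructor
    · rintro ⟨q, hq, rfl⟩
      obtain ⟨hq1, _, hq2, _⟩ := (hprops q hq).2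
      simpa [Int.toNat_of_nonneg hq1, Int.toNat_of_nonneg hq2] using hq
    · intro hmem
      exact ⟨_, hmem, by simp⟩
  have hset : ((Finset.range n.toNat ×ˢ Finset.range m.toNat).filter
        (fun p => ((p.1 : Int), (p.2 : Int)) ∉ S ++ new))
      = ((Finset.range n.toNat ×ˢ Finset.range m.toNat).filter
        (fun p => ((p.1 : Int), (p.2 : Int)) ∉ S))
          \ (new.map (fun p : Int × Int => (p.1.toNat, p.2.toNat))).toFinset := by
    ext p
    simp only [Finset.mem_filter, Finset.mem_sdiff, List.mem_append, hmemN]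
    tauto
  have hsub : (new.map (fun p : Int × Int => (p.1.toNat, p.2.toNat))).toFinset
      ⊆ ((Finset.range n.toNat ×ˢ Finset.range m.toNat).filter
        (fun p => ((p.1 : Int), (p.2 : Int)) ∉ S)) := by
    intro p hp
    rw [hmemN] at hp
    obtain ⟨hns, h1, h2, h3, h4⟩ := hprops _ hp
    simp only [Finset.mem_filter, Finset.mem_product, Finset.mem_range]
    exact ⟨⟨by omega, by omega⟩, hns⟩
  have hcard : (new.map (fun p : Int × Int => (p.1.toNat, p.2.toNat))).toFinset.card
      = new.length := by
    rw [List.toFinset_card_of_nodup hndN, List.length_map]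
  have hle := Finset.card_le_card hsub
  rw [pvUnseen, pvUnseen, hset, Finset.card_sdiff, Finset.inter_eq_left.mpr hsub, hcard]
  rw [hcard] at hle
  omega

lemma pvUnseen_le (n m : Int) (S : List (Int × Int)) :
    pvUnseen n m S ≤ n.toNat * m.toNat := by
  calc pvUnseen n m S ≤ (Finset.range n.toNat ×ˢ Finset.range m.toNat).card :=
        Finset.card_filter_le _ _
    _ = n.toNat * m.toNat := by rw [Finset.card_product, Finset.card_range, Finset.card_range]

-- stage 1: with enough fuel on both sides, A's BFS count equals the ghost level loop's count
lemma pvMain (grid : List (List Int)) (n m : Int) :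
    ∀ (r : Nat) (F S : List (Int × Int)) (c v : Int) (fa fb : Nat),
      pvUnseen n m S = r →
      (∀ p ∈ F, pvCell? grid p = some v) →
      F.length + r + 1 ≤ fa → r + 2 ≤ fb →
      pvLoopA grid n m fa F S c = c + pvLoopPush grid n m fb F S v := by
  intro r
  induction r using Nat.strong_induction_on with
  | _ r IH =>
    intro F S c v fa fb hr HF hfa hfb
    obtain ⟨fb', rfl⟩ : ∃ fb', fb = fb' + 1 := ⟨fb - 1, by omega⟩
    rcases F with _ | ⟨p, F⟩
    · obtain ⟨fa', rfl⟩ : ∃ fa', fa = fa' + 1 := ⟨fa - 1, by omega⟩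
      simp [pvLoopA, pvLoopPush]
    · by_cases hv : v = 9
      · subst hv
        have hB : pvLoopPush grid n m (fb' + 1) (p :: F) S 9 = ((p :: F).length : Int) := by
          simp [pvLoopPush]
        rw [hB]
        obtain ⟨fa', rfl⟩ : ∃ fa', fa = fa' + (p :: F).length :=
          ⟨fa - (p :: F).length, by simp at hfa ⊢; omega⟩
        exact pvLoopA_nines grid n m (p :: F) S c fa' HF
      · have hv' : (v == 9) = false := by simp [hv]
        have hB : pvLoopPush grid n m (fb' + 1) (p :: F) S v
            = pvLoopPush grid n m fb'
                ((p :: F).foldl (pvExpand grid n m (v + 1)) ([], S)).1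
                ((p :: F).foldl (pvExpand grid n m (v + 1)) ([], S)).2 (v + 1) := by
          simp only [pvLoopPush, List.isEmpty_cons, hv', Bool.or_self, Bool.false_eq_true,
            if_false]
        obtain ⟨fa', rfl⟩ : ∃ fa', fa = fa' + (p :: F).length :=
          ⟨fa - (p :: F).length, by simp at hfa ⊢; omega⟩
        have hfa' : r + 1 ≤ fa' := by simp at hfa; omega
        have hA := pvLoopA_level grid n m v hv' (p :: F) [] S c fa' HF
        rw [List.append_nil] at hA
        rw [hA, hB]
        obtain ⟨new, hfold, hnd, hprops⟩ :=
          pvFoldExpand_spec grid n m (v + 1) (p :: F) [] S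
        rw [hfold]
        simp only [List.nil_append]
        have hru : pvUnseen n m (S ++ new) + new.length = r := by
          rw [pvUnseen_append n m S new hnd (fun x hx => ⟨(hprops x hx).1, (hprops x hx).2.2⟩)]
          exact hr
        rcases new with _ | ⟨a, new'⟩
        · obtain ⟨fa'', rfl⟩ : ∃ k, fa' = k + 1 := ⟨fa' - 1, by omega⟩
          obtain ⟨fb'', rfl⟩ : ∃ k, fb' = k + 1 := ⟨fb' - 1, by omega⟩
          simp [pvLoopA, pvLoopPush]
        · have hlt : pvUnseen n m (S ++ a :: new') < r := by
            simp at hru; omega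
          exact IH _ hlt (a :: new') (S ++ a :: new') c (v + 1) fa' fb' rfl
            (fun x hx => (hprops x hx).2.1)
            (by simp at hru ⊢; omega) (by simp at hru ⊢; omega)

-- ===== stage 2: the ghost level loop equals B's pull loop =====

-- seen-membership through one candidate step
lemma pvStepB_mem_seen (grid : List (List Int)) (n m w : Int)
    (acc : List (Int × Int) × PySem.Set (Int × Int)) (a q : Int × Int) :
    q ∈ (pvStepB grid n m w acc a).2
      ↔ q ∈ acc.2 ∨ (q = a ∧ pvInRange n m a ∧ pvCell? grid a = some w) := by
  unfold pvStepB
  split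
  · rename_i h
    simp only [Bool.and_eq_true, Bool.not_eq_true', decide_eq_true_eq, beq_iff_eq] at h
    obtain ⟨⟨⟨⟨⟨h1, h2⟩, h3⟩, h4⟩, h5⟩, _⟩ := h
    rw [PySem.Set.mem_add]
    constructor
    · rintro (hm | rfl)
      · exact Or.inl hm
      · exact Or.inr ⟨rfl, ⟨h1, h2, h3, h4⟩, h5⟩
    · rintro (hm | ⟨rfl, _, _⟩)
      · exact Or.inl hm
      · exact Or.inr rfl
  · rename_i h
    constructor
    · exact Or.inl
    · rintro (hm | ⟨rfl, ⟨h1, h2, h3, h4⟩, h5⟩)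
      · exact hm
      · -- the condition failed although q is eligible: it must already be in seen
        by_cases hc : PySem.Set.contains acc.2 q = true
        · exact (PySem.Set.contains_iff _ _).mp hc
        · exfalso
          apply h
          rw [Bool.not_eq_true] at hc
          simp only [Bool.and_eq_true, decide_eq_true_eq, beq_iff_eq, Bool.not_eq_eq_eq_not,
            Bool.not_true]
          exact ⟨⟨⟨⟨⟨h1, h2⟩, h3⟩, h4⟩, h5⟩, hc⟩

-- seen-membership through a fold of candidate steps
lemma pvFoldStepB_mem_seen (grid : List (List Int)) (n m w : Int) :
    ∀ (L : List (Int × Int)) (acc : List (Int × Int) × PySem.Set (Int × Int)) (q : Int × Int),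
      q ∈ (L.foldl (pvStepB grid n m w) acc).2
        ↔ q ∈ acc.2 ∨ (q ∈ L ∧ pvInRange n m q ∧ pvCell? grid q = some w) := by
  intro L
  induction L with
  | nil => intro acc q; simp
  | cons a L ih =>
    intro acc q
    simp only [List.foldl_cons, ih, pvStepB_mem_seen, List.mem_cons]
    constructor
    · rintro ((hm | ⟨rfl, hr, hc⟩) | ⟨hL, hr, hc⟩)
      · exact Or.inl hm
      · exact Or.inr ⟨Or.inl rfl, hr, hc⟩
      · exact Or.inr ⟨Or.inr hL, hr, hc⟩
    · rintro (hm | ⟨rfl | hL, hr, hc⟩)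
      · exact Or.inl (Or.inl hm)
      · exact Or.inl (Or.inr ⟨rfl, hr, hc⟩)
      · exact Or.inr ⟨hL, hr, hc⟩

-- seen-membership through a whole level sweep
lemma pvFoldExpand_mem_seen (grid : List (List Int)) (n m w : Int) :
    ∀ (F : List (Int × Int)) (acc : List (Int × Int) × PySem.Set (Int × Int)) (q : Int × Int),
      q ∈ (F.foldl (pvExpand grid n m w) acc).2
        ↔ q ∈ acc.2 ∨ ((∃ p ∈ F, q ∈ pvNbrs p) ∧ pvInRange n m q ∧ pvCell? grid q = some w) := by
  intro F
  induction F with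
  | nil => intro acc q; simp
  | cons p F ih =>
    intro acc q
    simp only [List.foldl_cons, ih, pvExpand, pvFoldStepB_mem_seen, List.mem_cons]
    constructor
    · rintro ((hm | ⟨hn, hr, hc⟩) | ⟨⟨x, hx, hn⟩, hr, hc⟩)
      · exact Or.inl hm
      · exact Or.inr ⟨⟨p, Or.inl rfl, hn⟩, hr, hc⟩
      · exact Or.inr ⟨⟨x, Or.inr hx, hn⟩, hr, hc⟩
    · rintro (hm | ⟨⟨x, rfl | hx, hn⟩, hr, hc⟩)
      · exact Or.inl (Or.inl hm)
      · exact Or.inl (Or.inr ⟨hn, hr, hc⟩)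
      · exact Or.inr ⟨⟨x, hx, hn⟩, hr, hc⟩

-- characterisation of the new cells of one level sweep
lemma pvNew_mem (grid : List (List Int)) (n m w : Int)
    (F : List (Int × Int)) (S : PySem.Set (Int × Int)) (new : List (Int × Int))
    (hfold : F.foldl (pvExpand grid n m w) ([], S) = (new, S ++ new))
    (hfresh : ∀ p ∈ new, p ∉ S) (q : Int × Int) :
    q ∈ new ↔ q ∉ S ∧ (∃ p ∈ F, q ∈ pvNbrs p) ∧ pvInRange n m q ∧ pvCell? grid q = some w := by
  have hseen := pvFoldExpand_mem_seen grid n m w F ([], S) q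
  rw [hfold] at hseen
  simp only at hseen
  constructor
  · intro hq
    have hns := hfresh q hq
    have : q ∈ S ++ new := by simp [hq]
    rw [hseen] at this
    rcases this with hS | hrest
    · exact absurd hS hns
    · exact ⟨hns, hrest⟩
  · rintro ⟨hns, hrest⟩
    have : q ∈ S ++ new := hseen.mpr (Or.inr hrest)
    rcases List.mem_append.mp this with hS | hq
    · exact absurd hS hns
    · exact hq

-- the neighbour relation is symmetric
lemma pvNbrs_symm (p q : Int × Int) : q ∈ pvNbrs p ↔ p ∈ pvNbrs q := by
  simp only [pvNbrs, List.mem_cons, List.not_mem_nil, or_false, Prod.ext_iff]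
  omega

-- B's neighbour test says: some cell of the layer is a neighbour
lemma pvNbrIn_iff (F : List (Int × Int)) (q : Int × Int) :
    pvNbrIn F q.1 q.2 = true ↔ ∃ p ∈ F, q ∈ pvNbrs p := by
  simp only [pvNbrIn, Bool.or_eq_true, List.contains_eq_mem, decide_eq_true_eq]
  constructor
  · rintro (((h | h) | h) | h)
    all_goals refine ⟨_, h, ?_⟩ <;> simp [pvNbrs]
  · rintro ⟨p, hp, hn⟩
    rw [pvNbrs_symm] at hn
    simp only [pvNbrs, List.mem_cons, List.not_mem_nil, or_false] at hn
    rcases hn with h | h | h | h <;> rw [h] at hp <;> tauto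

-- membership in B's pulled layer
lemma pvPull_mem (grid : List (List Int)) (n m w : Int) (F : List (Int × Int)) (q : Int × Int) :
    q ∈ pvPull grid n m w F
      ↔ pvInRange n m q ∧ pvCell? grid q = some w ∧ (∃ p ∈ F, q ∈ pvNbrs p) := by
  simp only [pvPull, List.mem_filter, List.mem_flatMap, List.mem_map,
    PySem.List.mem_pyRange_one, Bool.and_eq_true, beq_iff_eq, pvNbrIn_iff, pvInRange]
  constructor
  · rintro ⟨⟨a, ⟨ha1, ha2⟩, b, ⟨hb1, hb2⟩, rfl⟩, hc, hn⟩
    exact ⟨⟨ha1, ha2, hb1, hb2⟩, hc, hn⟩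
  · rintro ⟨⟨h1, h2, h3, h4⟩, hc, hn⟩
    exact ⟨⟨q.1, ⟨h1, h2⟩, q.2, ⟨h3, h4⟩, rfl⟩, hc, hn⟩

-- B's pulled layer has no duplicates
lemma pvPull_nodup (grid : List (List Int)) (n m w : Int) (F : List (Int × Int)) :
    (pvPull grid n m w F).Nodup := by
  apply List.Nodup.filter
  apply List.nodup_flatMap.mpr
  constructor
  · intro a _
    exact (PySem.List.nodup_pyRange_one 0 m).map (by intro x y h; cases h; rfl)
  · apply List.Pairwise.imp ?_ (PySem.List.pairwise_lt_pyRange_one 0 n)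
    intro a b hab
    simp only [List.disjoint_left, List.mem_map]
    rintro x ⟨c, _, rfl⟩ ⟨d, _, h⟩
    cases h
    omega

-- stage 2 main lemma: the ghost loop and B's pull loop agree, level by level
lemma pvPushPull (grid : List (List Int)) (n m : Int) :
    ∀ (fuel : Nat) (F F' : List (Int × Int)) (S : PySem.Set (Int × Int)) (v : Int),
      F.Nodup → F'.Nodup → (∀ q, q ∈ F ↔ q ∈ F') →
      (∀ p ∈ F, pvCell? grid p = some v) →
      (∀ p ∈ S, ∃ w, pvCell? grid p = some w ∧ w ≤ v) →
      pvLoopPush grid n m fuel F S v = pvLoopPull grid n m fuel F' v := by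
  intro fuel
  induction fuel with
  | zero =>
    intro F F' S v hF hF' hmem _ _
    simp only [pvLoopPush, pvLoopPull]
    rw [((List.perm_ext_iff_of_nodup hF hF').mpr hmem).length_eq]
  | succ fuel ih =>
    intro F F' S v hF hF' hmem HF HS
    have hperm : F.Perm F' := (List.perm_ext_iff_of_nodup hF hF').mpr hmem
    have hempty : F.isEmpty = F'.isEmpty := by
      rcases F with _ | ⟨a, F⟩ <;> rcases F' with _ | ⟨b, F'⟩ <;> simp_all
    simp only [pvLoopPush, pvLoopPull, ← hempty]
    by_cases hstop : (F.isEmpty || v == 9) = true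
    · have hcond : (!(v == 9) && !F.isEmpty) = false := by
        rcases Bool.or_eq_true _ _ |>.mp hstop with h | h <;> simp [h]
      rw [if_pos hstop, hcond]
      simp [hperm.length_eq]
    · rw [if_neg hstop]
      have hgo : (!(v == 9) && !F.isEmpty) = true := by
        simp only [Bool.or_eq_true, not_or] at hstop
        push Not at hstop
        simp_all
      rw [hgo, if_pos rfl]
      obtain ⟨new, hfold, hnd, hprops⟩ := pvFoldExpand_spec grid n m (v + 1) F [] S
      simp only [List.nil_append] at hfold
      rw [hfold]
      apply ih
      · exact hnd
      · exact pvPull_nodup grid n m (v + 1) F'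
      · -- the new cells and the pulled layer are the same set
        intro q
        rw [pvNew_mem grid n m (v + 1) F S new hfold (fun p hp => (hprops p hp).1) q,
          pvPull_mem]
        constructor
        · rintro ⟨_, hadj, hr, hc⟩
          exact ⟨hr, hc, by
            obtain ⟨p, hp, hn⟩ := hadj
            exact ⟨p, (hmem p).mp hp, hn⟩⟩
        · rintro ⟨hr, hc, p, hp, hn⟩
          refine ⟨?_, ⟨p, (hmem p).mpr hp, hn⟩, hr, hc⟩
          intro hqS
          obtain ⟨w, hw, hwle⟩ := HS q hqS
          rw [hc] at hw
          have : v + 1 = w := by injection hw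
          omega
      · exact fun p hp => (hprops p hp).2.1
      · intro p hp
        rcases List.mem_append.mp hp with hS | hnew
        · obtain ⟨w, hw, hwle⟩ := HS p hS
          exact ⟨w, hw, by omega⟩
        · exact ⟨v + 1, (hprops p hnew).2.1, le_refl _⟩

-- Pre_ guarantees the start cell exists
lemma pvPreCell (grid : List (List Int)) (i j : Int)
    (h : Pre_get_trailhead_score grid i j) : ∃ v0, pvCell? grid (i, j) = some v0 := by
  obtain ⟨hn, hrect, hi1, hi2, hj1, hj2⟩ := h
  rcases hg : PySem.List.pyGet? grid i with _ | row
  · rw [PySem.List.pyGet?_eq_none_iff] at hg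
    exact absurd ⟨hi1, hi2⟩ hg
  · have hlen : (grid.headD []).length ≤ row.length :=
      hrect row (PySem.List.mem_of_pyGet?_eq_some grid hg)
    rcases hr : PySem.List.pyGet? row j with _ | v0
    · rw [PySem.List.pyGet?_eq_none_iff] at hr
      exact absurd ⟨by omega, by omega⟩ hr
    · exact ⟨v0, by simp [pvCell?, hg, hr]⟩

-- ===== VERDICT (by name: the statement is the Claim_ definition above) =====
theorem get_trailhead_score_spec : Claim_equal_get_trailhead_score := by
  intro grid i j _ hPre
  obtain ⟨v0, hc⟩ := pvPreCell grid i j hPre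
  unfold Spec_get_trailhead_score get_trailhead_score get_trailhead_score_alt
  rw [hc]
  have hof : PySem.Set.ofList [(i, j)] = [(i, j)] := rfl
  rw [hof]
  have hb := pvUnseen_le (grid.length : Int) ((grid.headD []).length : Int) [(i, j)]
  rw [Int.toNat_natCast, Int.toNat_natCast] at hb
  have hstart : ∀ p ∈ [(i, j)], pvCell? grid p = some v0 := by
    intro p hp; simp at hp; subst hp; exact hc
  have h1 := pvMain grid (grid.length : Int) ((grid.headD []).length : Int)
    (pvUnseen (grid.length : Int) ((grid.headD []).length : Int) [(i, j)])
    [(i, j)] [(i, j)] 0 v0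
    (grid.length * (grid.headD []).length + 2) (grid.length * (grid.headD []).length + 2)
    rfl hstart
    (by simp only [List.length_cons, List.length_nil]; omega) (by omega)
  have h2 := pvPushPull grid (grid.length : Int) ((grid.headD []).length : Int)
    (grid.length * (grid.headD []).length + 2)
    [(i, j)] [(i, j)] [(i, j)] v0
    (by simp) (by simp) (fun q => Iff.rfl) hstart
    (by intro p hp; simp at hp; subst hp; exact ⟨v0, hc, le_refl _⟩)
  rw [h2] at h1
  simpa using h1
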